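-- pv_equiv track=rewrite | github.com/j4cobgarby/Rotochess | loopgrid.py | rotate_v2d
-- ===== SOURCE A (Python) =====
-- def rotate_v2d(x, y, cw, steps):
--     ret = [x, y]
--     for i in range(steps):
--         if (cw):
--             ret[0], ret[1] = ret[1], -ret[0]
--         else:
--             ret[0], ret[1] = -ret[1], ret[0]
--     return ret
-- ===== SOURCE B (Python) =====
-- def rotate_v2d(x, y, cw, steps):
--     # 90-degree rotations are periodic with period 4: reduce to one quarter-turn count.
--     k = steps % 4 if cw else (-steps) % 4   # net quarter turns clockwise
--     if k == 0:
--         return [x, y]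
--     if k == 1:
--         return [y, -x]
--     if k == 2:
--         return [-x, -y]
--     return [-y, x]
-- ===== Notes on version B (the rewrite author's own statement) =====
-- stated objective: faster
-- what changed: Replaces the steps-long rotation loop with a closed form: reduce steps mod 4 and return the corresponding quarter-turn of (x,y).
-- intended difference: For negative steps not divisible by 4 (with (x,y) != (0,0)), A's empty range silently returns [x,y] unrotated, while B rotates by steps mod 4, i.e. treats negative steps as rotation in the opposite direction, which is the intended meaning of a negative step count. — e.g. on rotate_v2d(1, 2, true, -1): A returns [1, 2], B returns [-2, 1]
import Mathlib
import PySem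

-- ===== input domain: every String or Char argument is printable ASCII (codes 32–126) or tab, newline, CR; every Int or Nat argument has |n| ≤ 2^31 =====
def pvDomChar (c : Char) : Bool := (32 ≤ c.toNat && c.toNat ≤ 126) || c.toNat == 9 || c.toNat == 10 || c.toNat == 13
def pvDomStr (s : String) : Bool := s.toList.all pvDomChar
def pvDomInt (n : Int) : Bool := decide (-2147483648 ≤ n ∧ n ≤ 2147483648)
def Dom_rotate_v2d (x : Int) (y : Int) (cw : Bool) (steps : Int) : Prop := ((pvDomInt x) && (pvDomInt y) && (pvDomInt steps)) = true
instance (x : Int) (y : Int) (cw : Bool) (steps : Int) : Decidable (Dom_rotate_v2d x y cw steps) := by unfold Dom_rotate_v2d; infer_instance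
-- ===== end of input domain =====

-- B replaces A's steps-long loop by the closed-form quarter-turn selected by steps mod 4 (O(1) instead of O(steps)).

-- ===== PORT A =====
-- the pair (ret[0], ret[1]); the loop body swaps/negates it, branch order as in A
def rotate_v2d (x : Int) (y : Int) (cw : Bool) (steps : Int) : List Int :=
  let ret := (PySem.List.pyRange 0 steps 1).foldl
    (fun (r : Int × Int) _ => if cw then (r.2, -r.1) else (-r.2, r.1)) (x, y)
  [ret.1, ret.2]

-- ===== PORT B =====
def rotate_v2d_alt (x : Int) (y : Int) (cw : Bool) (steps : Int) : List Int :=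
  let k := if cw then PySem.Int.mod steps 4 else PySem.Int.mod (-steps) 4
  if k = 0 then [x, y]
  else if k = 1 then [y, -x]
  else if k = 2 then [-x, -y]
  else [-y, x]

-- ===== PRECONDITION & SPEC =====
-- For negative steps not divisible by 4 (and (x,y) ≠ (0,0)), A's empty range silently returns
-- [x,y] unrotated, while B rotates by steps mod 4, i.e. treats a negative step count as rotation
-- in the opposite direction — the intended meaning of a negative step count.
def D_rotate_v2d (x : Int) (y : Int) (cw : Bool) (steps : Int) : Prop :=
  steps < 0 ∧ PySem.Int.mod steps 4 ≠ 0 ∧ (x ≠ 0 ∨ y ≠ 0)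
instance (x : Int) (y : Int) (cw : Bool) (steps : Int) : Decidable (D_rotate_v2d x y cw steps) := by
  unfold D_rotate_v2d; infer_instance

def Spec_rotate_v2d (x : Int) (y : Int) (cw : Bool) (steps : Int) (out : List Int) : Prop :=
  ¬ D_rotate_v2d x y cw steps → out = rotate_v2d_alt x y cw steps
instance (x : Int) (y : Int) (cw : Bool) (steps : Int) (out : List Int) : Decidable (Spec_rotate_v2d x y cw steps out) := by
  unfold Spec_rotate_v2d; infer_instance

def pvDiffWitness_rotate_v2d : Int × Int × Bool × Int := (1, 2, true, -1)
def pvDiffWitnessOut_rotate_v2d : (List Int) × (List Int) := ([1, 2], [-2, 1])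

-- ===== CLAIM (what is proved, stated in full; the proofs are below) =====
def Claim_unchanged_rotate_v2d : Prop := ∀ (x : Int) (y : Int) (cw : Bool) (steps : Int), Dom_rotate_v2d x y cw steps → Spec_rotate_v2d x y cw steps (rotate_v2d x y cw steps)
def Claim_changed_rotate_v2d : Prop := Dom_rotate_v2d (pvDiffWitness_rotate_v2d.1) (pvDiffWitness_rotate_v2d.2.1) (pvDiffWitness_rotate_v2d.2.2.1) (pvDiffWitness_rotate_v2d.2.2.2) ∧ D_rotate_v2d (pvDiffWitness_rotate_v2d.1) (pvDiffWitness_rotate_v2d.2.1) (pvDiffWitness_rotate_v2d.2.2.1) (pvDiffWitness_rotate_v2d.2.2.2) ∧ rotate_v2d (pvDiffWitness_rotate_v2d.1) (pvDiffWitness_rotate_v2d.2.1) (pvDiffWitness_rotate_v2d.2.2.1) (pvDiffWitness_rotate_v2d.2.2.2) = pvDiffWitnessOut_rotate_v2d.1 ∧ rotate_v2d_alt (pvDiffWitness_rotate_v2d.1) (pvDiffWitness_rotate_v2d.2.1) (pvDiffWitness_rotate_v2d.2.2.1) (pvDiffWitness_rotate_v2d.2.2.2) = pvDiffWitnessOut_rotate_v2d.2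 ∧ pvDiffWitnessOut_rotate_v2d.1 ≠ pvDiffWitnessOut_rotate_v2d.2
def Claim_exact_rotate_v2d : Prop := ∀ (x : Int) (y : Int) (cw : Bool) (steps : Int), Dom_rotate_v2d x y cw steps → D_rotate_v2d x y cw steps → rotate_v2d x y cw steps ≠ rotate_v2d_alt x y cw steps

-- ===== LEMMAS AND PROOFS =====

-- the loop body as a function of the state pair
def rotStep (cw : Bool) (r : Int × Int) : Int × Int := if cw then (r.2, -r.1) else (-r.2, r.1)

theorem foldl_const_iterate {α β : Type} (f : α → α) (l : List β) (init : α) :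
    l.foldl (fun r _ => f r) init = f^[l.length] init := by
  induction l generalizing init with
  | nil => rfl
  | cons a t ih => simp [List.foldl, ih, Function.iterate_succ_apply]

theorem rotStep_four (cw : Bool) (p : Int × Int) : (rotStep cw)^[4] p = p := by
  cases cw <;> simp [rotStep, Function.iterate_succ_apply]

theorem rotStep_iterate_mod (cw : Bool) (n : Nat) (p : Int × Int) :
    (rotStep cw)^[n] p = (rotStep cw)^[n % 4] p := by
  have key : ∀ q r, (rotStep cw)^[4 * q + r] p = (rotStep cw)^[r] p := by
    intro q r
    induction q with
    | zero => simp
    | succ q ih =>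
        rw [show 4 * (q + 1) + r = (4 * q + r) + 4 by ring,
            Function.iterate_add_apply, rotStep_four, ih]
  calc (rotStep cw)^[n] p = (rotStep cw)^[4 * (n / 4) + n % 4] p := by rw [Nat.div_add_mod]
    _ = (rotStep cw)^[n % 4] p := key _ _

theorem rotate_v2d_eq_iter (x y : Int) (cw : Bool) (steps : Int) :
    rotate_v2d x y cw steps =
      [((rotStep cw)^[steps.toNat] (x, y)).1, ((rotStep cw)^[steps.toNat] (x, y)).2] := by
  unfold rotate_v2d
  rw [show (fun (r : Int × Int) (_ : Int) => if cw then (r.2, -r.1) else (-r.2, r.1)) =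
        (fun r _ => rotStep cw r) from rfl,
      foldl_const_iterate, PySem.List.length_pyRange_one]
  simp

theorem rotate_v2d_eq_alt_of_nonneg (x y : Int) (cw : Bool) (steps : Int) (h : 0 ≤ steps) :
    rotate_v2d x y cw steps = rotate_v2d_alt x y cw steps := by
  rw [rotate_v2d_eq_iter, rotStep_iterate_mod]
  have hmod : PySem.Int.mod steps 4 = steps % 4 := PySem.Int.mod_eq_emod_of_pos (by norm_num)
  have hmodn : PySem.Int.mod (-steps) 4 = (-steps) % 4 := PySem.Int.mod_eq_emod_of_pos (by norm_num)
  have hs : (steps.toNat : Int) = steps := Int.toNat_of_nonneg h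
  unfold rotate_v2d_alt
  have h4 : steps % 4 = 0 ∨ steps % 4 = 1 ∨ steps % 4 = 2 ∨ steps % 4 = 3 := by omega
  rcases h4 with hr | hr | hr | hr
  · have ht : steps.toNat % 4 = 0 := by omega
    have hn : (-steps) % 4 = 0 := by omega
    rw [ht]; cases cw <;> simp [hmod, hmodn, hr, hn, rotStep]
  · have ht : steps.toNat % 4 = 1 := by omega
    have hn : (-steps) % 4 = 3 := by omega
    rw [ht]; cases cw <;> simp [hmod, hmodn, hr, hn, rotStep]
  · have ht : steps.toNat % 4 = 2 := by omega
    have hn : (-steps) % 4 = 2 := by omega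
    rw [ht]; cases cw <;> simp [hmod, hmodn, hr, hn, rotStep, Function.iterate_succ_apply]
  · have ht : steps.toNat % 4 = 3 := by omega
    have hn : (-steps) % 4 = 1 := by omega
    rw [ht]; cases cw <;> simp [hmod, hmodn, hr, hn, rotStep, Function.iterate_succ_apply]

theorem rotate_v2d_neg (x y : Int) (cw : Bool) (steps : Int) (h : steps < 0) :
    rotate_v2d x y cw steps = [x, y] := by
  unfold rotate_v2d
  rw [PySem.List.pyRange_one_eq_nil (by omega)]
  rfl

-- ===== VERDICT (by name: the statement is the Claim_ definition above) =====
theorem rotate_v2d_spec : Claim_unchanged_rotate_v2d := by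
  intro x y cw steps _ hnd
  rcases (by omega : 0 ≤ steps ∨ steps < 0) with hpos | hneg
  · exact rotate_v2d_eq_alt_of_nonneg x y cw steps hpos
  · rw [rotate_v2d_neg x y cw steps hneg]
    unfold D_rotate_v2d at hnd
    push_neg at hnd
    rcases eq_or_ne (PySem.Int.mod steps 4) 0 with hm0 | hm0
    · have hmod : PySem.Int.mod steps 4 = steps % 4 := PySem.Int.mod_eq_emod_of_pos (by norm_num)
      have hmodn : PySem.Int.mod (-steps) 4 = (-steps) % 4 := PySem.Int.mod_eq_emod_of_pos (by norm_num)
      have hm0' : steps % 4 = 0 := by omega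
      have hm0n : (-steps) % 4 = 0 := by omega
      unfold rotate_v2d_alt
      cases cw <;> simp [hmod, hmodn, hm0', hm0n]
    · obtain ⟨hx, hy⟩ := hnd hneg hm0
      subst hx; subst hy
      unfold rotate_v2d_alt
      split_ifs <;> simp

theorem rotate_v2d_changed : Claim_changed_rotate_v2d := by
  unfold Claim_changed_rotate_v2d; decide

theorem rotate_v2d_tight : Claim_exact_rotate_v2d := by
  intro x y cw steps _ hd
  obtain ⟨hneg, hm, hxy⟩ := hd
  rw [rotate_v2d_neg x y cw steps hneg]
  have hmod : PySem.Int.mod steps 4 = steps % 4 := PySem.Int.mod_eq_emod_of_pos (by norm_num)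
  have hmodn : PySem.Int.mod (-steps) 4 = (-steps) % 4 := PySem.Int.mod_eq_emod_of_pos (by norm_num)
  have hm' : steps % 4 = 1 ∨ steps % 4 = 2 ∨ steps % 4 = 3 := by
    rw [hmod] at hm; omega
  unfold rotate_v2d_alt
  intro heq
  rcases hm' with hr | hr | hr
  · have hn : (-steps) % 4 = 3 := by omega
    cases cw <;> simp [hmod, hmodn, hr, hn] at heq <;> omega
  · have hn : (-steps) % 4 = 2 := by omega
    cases cw <;> simp [hmod, hmodn, hr, hn] at heq <;> omega
  · have hn : (-steps) % 4 = 1 := by omega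
    cases cw <;> simp [hmod, hmodn, hr, hn] at heq <;> omega
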